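-- pv_equiv track=rewrite | github.com/AyudaEnPython/Soluciones | ejercicios/futuro_mundo/main.py | process
-- ===== SOURCE A (Python) =====
-- def process(data, countries):
--     nuevo_mundo, transicion, origen = [], [], []
--     classification = ("androides", "cyborgs", "superhumanos", "humanos")
--     for country in countries:
--         a, c, s, h = [data[country][kind] for kind in classification]
--         if c+a > s+h:
--             nuevo_mundo.append(country)
--         else:
--             if c+a+s > h:
--                 transicion.append(country)
--             elif h > c+a+s:
--                 origen.append(country)
--     return [nuevo_mundo, transicion, origen]
-- ===== SOURCE B (Python) =====
-- def _counts(data, country):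
--     row = data[country]
--     return (row["androides"], row["cyborgs"], row["superhumanos"], row["humanos"])
--
--
-- def _is_nuevo(data, country):
--     a, c, s, h = _counts(data, country)
--     return c + a > s + h
--
--
-- def _is_transicion(data, country):
--     a, c, s, h = _counts(data, country)
--     return (not (c + a > s + h)) and (c + a + s > h)
--
--
-- def _is_origen(data, country):
--     a, c, s, h = _counts(data, country)
--     return (not (c + a > s + h)) and (h > c + a + s)
--
--
-- def process(data, countries):
--     return [
--         [co for co in countries if _is_nuevo(data, co)],
--         [co for co in countries if _is_transicion(data, co)],
--         [co for co in countries if _is_origen(data, co)],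
--     ]
-- ===== Notes on version B (the rewrite author's own statement) =====
-- stated objective: alternative
-- what changed: Replaces the single branching loop with a shared accumulator triple by three independent filtered passes over countries, one predicate per output group.
import Mathlib
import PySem

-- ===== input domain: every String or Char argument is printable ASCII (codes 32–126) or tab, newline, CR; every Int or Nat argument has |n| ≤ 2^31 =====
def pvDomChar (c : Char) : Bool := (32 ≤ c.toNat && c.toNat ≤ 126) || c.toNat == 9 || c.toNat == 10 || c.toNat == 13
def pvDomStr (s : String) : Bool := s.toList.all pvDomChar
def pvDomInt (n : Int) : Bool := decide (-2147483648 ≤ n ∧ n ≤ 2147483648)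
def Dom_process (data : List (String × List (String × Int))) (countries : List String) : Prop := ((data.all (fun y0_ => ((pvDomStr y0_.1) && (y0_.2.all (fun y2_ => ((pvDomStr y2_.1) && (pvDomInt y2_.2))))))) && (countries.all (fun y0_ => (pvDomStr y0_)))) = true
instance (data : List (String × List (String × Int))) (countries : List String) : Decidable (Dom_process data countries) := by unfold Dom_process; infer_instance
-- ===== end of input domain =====

-- ===== PORT A =====
-- One honest line: B replaces A's single branching loop by three independent filtered passes, one per group (alternative decomposition, same cost).

def alGet? {v : Type} (l : List (String × v)) (k : String) : Option v :=
  match l with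
  | [] => none
  | (a, b) :: t => if a == k then some b else alGet? t k

-- the four looked-up values a, c, s, h for one country (A's comprehension over classification)
def vals (data : List (String × List (String × Int))) (country : String) : Int × Int × Int × Int :=
  let row := (alGet? data country).getD []
  ((alGet? row "androides").getD 0, (alGet? row "cyborgs").getD 0,
   (alGet? row "superhumanos").getD 0, (alGet? row "humanos").getD 0)

-- A's loop body: one country updates the (nuevo_mundo, transicion, origen) triple
def processStep (data : List (String × List (String × Int)))
    (st : List String × List String × List String) (country : String) :
    List String × List String × List String :=
  let q := vals data country
  if q.2.1 + q.1 > q.2.2.1 + q.2.2.2 then (st.1 ++ [country], st.2.1, st.2.2)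
  else if q.2.1 + q.1 + q.2.2.1 > q.2.2.2 then (st.1, st.2.1 ++ [country], st.2.2)
  else if q.2.2.2 > q.2.1 + q.1 + q.2.2.1 then (st.1, st.2.1, st.2.2 ++ [country])
  else st

def process (data : List (String × List (String × Int))) (countries : List String) : List (List String) :=
  let st := countries.foldl (processStep data) ([], [], [])
  [st.1, st.2.1, st.2.2]

-- ===== PORT B =====
def counts (data : List (String × List (String × Int))) (country : String) : Int × Int × Int × Int :=
  let row := (alGet? data country).getD []
  ((alGet? row "androides").getD 0, (alGet? row "cyborgs").getD 0,
   (alGet? row "superhumanos").getD 0, (alGet? row "humanos").getD 0)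

def isNuevo (data : List (String × List (String × Int))) (country : String) : Bool :=
  let q := counts data country
  decide (q.2.1 + q.1 > q.2.2.1 + q.2.2.2)

def isTransicion (data : List (String × List (String × Int))) (country : String) : Bool :=
  let q := counts data country
  !decide (q.2.1 + q.1 > q.2.2.1 + q.2.2.2) && decide (q.2.1 + q.1 + q.2.2.1 > q.2.2.2)

def isOrigen (data : List (String × List (String × Int))) (country : String) : Bool :=
  let q := counts data country
  !decide (q.2.1 + q.1 > q.2.2.1 + q.2.2.2) && decide (q.2.2.2 > q.2.1 + q.1 + q.2.2.1)

def process_alt (data : List (String × List (String × Int))) (countries : List String) : List (List String) :=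
  [countries.filter (isNuevo data),
   countries.filter (isTransicion data),
   countries.filter (isOrigen data)]

-- ===== PRECONDITION & SPEC =====
-- Pre_ excludes exactly the inputs where Python A raises KeyError: a listed country
-- missing from data, or one of the four classification keys missing from its row.
def Pre_process (data : List (String × List (String × Int))) (countries : List String) : Prop :=
  (countries.all (fun co =>
    match data.lookup co with
    | none => false
    | some row =>
        ["androides", "cyborgs", "superhumanos", "humanos"].all
          (fun k => (row.map Prod.fst).contains k))) = true
instance (data : List (String × List (String × Int))) (countries : List String) : Decidable (Pre_process data countries) := by unfold Pre_process; infer_instance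

def pvWitness_process : (List (String × List (String × Int))) × List String :=
  ([("ar", [("androides", 3), ("cyborgs", 1), ("superhumanos", 0), ("humanos", 2)])], ["ar"])
def Spec_process (data : List (String × List (String × Int))) (countries : List String) (out : List (List String)) : Prop := out = process_alt data countries
instance (data : List (String × List (String × Int))) (countries : List String) (out : List (List String)) : Decidable (Spec_process data countries out) := by unfold Spec_process; infer_instance

-- ===== CLAIM (what is proved, stated in full; the proofs are below) =====
def Claim_equal_process : Prop := ∀ (data : List (String × List (String × Int))) (countries : List String), Dom_process data countries → Pre_process data countries → Spec_process data countries (process data countries)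

-- ===== LEMMAS AND PROOFS =====

-- A's branch cascade on one abstract quadruple, written with B's three group predicates
theorem step_core (q : Int × Int × Int × Int) (x y z : List String) (co : String) :
    (if q.2.1 + q.1 > q.2.2.1 + q.2.2.2 then (x ++ [co], y, z)
     else if q.2.1 + q.1 + q.2.2.1 > q.2.2.2 then (x, y ++ [co], z)
     else if q.2.2.2 > q.2.1 + q.1 + q.2.2.1 then (x, y, z ++ [co])
     else (x, y, z)) =
    ((if (decide (q.2.1 + q.1 > q.2.2.1 + q.2.2.2)) then x ++ [co] else x),
     (if (!decide (q.2.1 + q.1 > q.2.2.1 + q.2.2.2) && decide (q.2.1 + q.1 + q.2.2.1 > q.2.2.2)) then y ++ [co] else y),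
     (if (!decide (q.2.1 + q.1 > q.2.2.1 + q.2.2.2) && decide (q.2.2.2 > q.2.1 + q.1 + q.2.2.1)) then z ++ [co] else z)) := by
  obtain ⟨a, c, s, h⟩ := q
  simp only []
  by_cases h1 : c + a > s + h
  · simp [h1]
  · by_cases h2 : c + a + s > h
    · simp [h1, h2, show ¬(h > c + a + s) from by omega]
    · by_cases h3 : h > c + a + s
      · simp [h1, h2, h3]
      · simp [h1, h2, h3]

-- A's step on one country, written with B's three group predicates
theorem processStep_eq (data : List (String × List (String × Int)))
    (x y z : List String) (co : String) :
    processStep data (x, y, z) co =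
      (if isNuevo data co then x ++ [co] else x,
       if isTransicion data co then y ++ [co] else y,
       if isOrigen data co then z ++ [co] else z) := by
  unfold processStep isNuevo isTransicion isOrigen
  simp only []
  exact step_core (vals data co) x y z co

-- loop invariant: folding A's step from (x, y, z) appends B's three filters
theorem foldl_processStep (data : List (String × List (String × Int)))
    (countries : List String) (x y z : List String) :
    countries.foldl (processStep data) (x, y, z) =
      (x ++ countries.filter (isNuevo data),
       y ++ countries.filter (isTransicion data),
       z ++ countries.filter (isOrigen data)) := by
  induction countries generalizing x y z with
  | nil => simp
  | cons co t ih =>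
      rw [List.foldl_cons, processStep_eq, ih]
      simp only [List.filter_cons]
      split_ifs <;> simp

-- ===== VERDICT (by name: the statement is the Claim_ definition above) =====
theorem process_spec : Claim_equal_process := by
  intro data countries _ _
  unfold Spec_process process process_alt
  simp [foldl_processStep]
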